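-- pv_equiv track=rewrite | github.com/samvoigt/SamBasic | utils/midi2basic.py | build_length_table
-- ===== SOURCE A (Python) =====
-- def build_length_table(quantize):
--     """Build available (grid_size, length_token) pairs for given quantize level.
--
--     Returns list sorted by grid_size descending.
--     """
--     # Standard note lengths and their grid sizes at Q=16:
--     # L1 = 16 grids, L2. = 12, L2 = 8, L4. = 6, L4 = 4, L8. = 3, L8 = 2, L16 = 1
--     # At other quantize levels, scale proportionally.
--     base = quantize  # grids per whole note = quantize
--     candidates = []
--     for divisor, token, dotted in [
--         (1,   'L1',    False),
--         (1,   'L2.',   True),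
--         (2,   'L2',    False),
--         (2,   'L4.',   True),
--         (4,   'L4',    False),
--         (4,   'L8.',   True),
--         (8,   'L8',    False),
--         (8,   'L16.',  True),
--         (16,  'L16',   False),
--         (16,  'L32.',  True),
--         (32,  'L32',   False),
--         (32,  'L64.',  True),
--         (64,  'L64',   False),
--         (64,  'L128.', True),
--         (128, 'L128',  False),
--         (128, 'L256.', True),
--         (256, 'L256',  False),
--     ]:
--         if dotted:
--             grids = base * 3 // (divisor * 4)
--         else:
--             grids = base // divisor
--         if grids >= 1:
--             candidates.append((grids, token))
--
--     # Deduplicate and sort descending by grid size.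
--     # When a dotted and undotted token map to the same grid count (due to
--     # integer truncation, e.g. L16. and L16 both → 1 at quantize=16),
--     # prefer the undotted token — the dotted one only landed here because
--     # of truncation and would play 1.5× too long in the audio engine.
--     seen = {}  # grid_size -> (grid_size, token)
--     for g, t in candidates:
--         is_dot = t.endswith('.')
--         if g not in seen:
--             seen[g] = (g, t)
--         elif is_dot:
--             pass  # keep existing undotted entry
--         else:
--             seen[g] = (g, t)  # undotted replaces dotted
--     result = sorted(seen.values(), key=lambda x: -x[0])
--     return result
-- ===== SOURCE B (Python) =====
-- def build_length_table(quantize):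
--     """Build available (grid_size, length_token) pairs for given quantize level.
--
--     Two passes keyed on the dotted flag: undotted tokens first (later
--     undotted overwrites), then dotted tokens only into free grid slots
--     (so undotted always wins a collision and the first dotted wins among
--     dotted-only collisions). Sorted descending by grid size.
--     """
--     undotted = [(1, 'L1'), (2, 'L2'), (4, 'L4'), (8, 'L8'), (16, 'L16'),
--                 (32, 'L32'), (64, 'L64'), (128, 'L128'), (256, 'L256')]
--     dotted = [(1, 'L2.'), (2, 'L4.'), (4, 'L8.'), (8, 'L16.'),
--               (16, 'L32.'), (32, 'L64.'), (64, 'L128.'), (128, 'L256.')]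
--     table = {}
--     for divisor, token in undotted:
--         grids = quantize // divisor
--         if grids >= 1:
--             table[grids] = (grids, token)
--     for divisor, token in dotted:
--         grids = quantize * 3 // (divisor * 4)
--         if grids >= 1 and grids not in table:
--             table[grids] = (grids, token)
--     return sorted(table.values(), key=lambda x: -x[0])
-- ===== Notes on version B (the rewrite author's own statement) =====
-- stated objective: alternative
-- what changed: A builds one interleaved candidate list and resolves undotted-vs-dotted collisions inside a single merge loop with an endswith('.') test; B drops the candidate list and merge entirely and runs two differently-shaped passes keyed on the dotted flag: an undotted overwrite pass, then a dotted insert-only-if-absent pass.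
import Mathlib
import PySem

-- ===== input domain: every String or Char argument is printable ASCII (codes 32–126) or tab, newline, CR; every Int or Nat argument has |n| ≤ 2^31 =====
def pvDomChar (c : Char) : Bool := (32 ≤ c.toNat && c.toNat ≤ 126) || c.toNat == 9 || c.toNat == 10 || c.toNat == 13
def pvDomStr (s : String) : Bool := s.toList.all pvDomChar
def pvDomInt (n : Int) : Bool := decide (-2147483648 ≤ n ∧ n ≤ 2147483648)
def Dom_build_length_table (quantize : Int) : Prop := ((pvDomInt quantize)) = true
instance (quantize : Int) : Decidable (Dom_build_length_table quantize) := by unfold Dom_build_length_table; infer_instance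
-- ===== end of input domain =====

-- B replaces A's single interleaved merge loop by two passes keyed on the dotted flag
-- (undotted overwrite pass, then dotted insert-if-absent pass): same return value, different decomposition.

-- ===== PORT A =====
def pvSpecsA : List (Int × String × Bool) :=
  [(1, "L1", false), (1, "L2.", true), (2, "L2", false), (2, "L4.", true),
   (4, "L4", false), (4, "L8.", true), (8, "L8", false), (8, "L16.", true),
   (16, "L16", false), (16, "L32.", true), (32, "L32", false), (32, "L64.", true),
   (64, "L64", false), (64, "L128.", true), (128, "L128", false), (128, "L256.", true),
   (256, "L256", false)]

-- the body of A's dedup loop ('for g, t in candidates: …')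
def pvStepA (d : PySem.Dict Int (Int × String)) (gt : Int × String) : PySem.Dict Int (Int × String) :=
  let is_dot := PySem.Str.endswith gt.2 "."
  if d.contains gt.1 then (if is_dot then d else d.insert gt.1 gt)
  else d.insert gt.1 gt

def build_length_table (quantize : Int) : List (Int × String) :=
  let base := quantize
  let candidates : List (Int × String) := pvSpecsA.foldl (fun acc e =>
      let grids := if e.2.2 then PySem.Int.floordiv (base * 3) (e.1 * 4)
                   else PySem.Int.floordiv base e.1
      if grids ≥ 1 then acc ++ [(grids, e.2.1)] else acc) []
  let seen := candidates.foldl pvStepA PySem.Dict.empty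
  PySem.List.sorted seen.values (fun x => -x.1) false

-- ===== PORT B =====
def pvUndotted : List (Int × String) :=
  [(1, "L1"), (2, "L2"), (4, "L4"), (8, "L8"), (16, "L16"),
   (32, "L32"), (64, "L64"), (128, "L128"), (256, "L256")]

def pvDotted : List (Int × String) :=
  [(1, "L2."), (2, "L4."), (4, "L8."), (8, "L16."),
   (16, "L32."), (32, "L64."), (64, "L128."), (128, "L256.")]

-- B's first loop body: undotted tokens, plain overwrite
def pvStepU (quantize : Int) (d : PySem.Dict Int (Int × String)) (e : Int × String) :
    PySem.Dict Int (Int × String) :=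
  let grids := PySem.Int.floordiv quantize e.1
  if grids ≥ 1 then d.insert grids (grids, e.2) else d

-- B's second loop body: dotted tokens, insert only into free grid slots
def pvStepD (quantize : Int) (d : PySem.Dict Int (Int × String)) (e : Int × String) :
    PySem.Dict Int (Int × String) :=
  let grids := PySem.Int.floordiv (quantize * 3) (e.1 * 4)
  if grids ≥ 1 && !(d.contains grids) then d.insert grids (grids, e.2) else d

def build_length_table_alt (quantize : Int) : List (Int × String) :=
  let table := pvUndotted.foldl (pvStepU quantize) PySem.Dict.empty
  let table := pvDotted.foldl (pvStepD quantize) table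
  PySem.List.sorted table.values (fun x => -x.1) false

-- ===== PRECONDITION & SPEC =====
def Spec_build_length_table (quantize : Int) (out : List (Int × String)) : Prop := out = build_length_table_alt quantize
instance (quantize : Int) (out : List (Int × String)) : Decidable (Spec_build_length_table quantize out) := by unfold Spec_build_length_table; infer_instance

-- ===== CLAIM (what is proved, stated in full; the proofs are below) =====
def Claim_equal_build_length_table : Prop := ∀ (quantize : Int), Dom_build_length_table quantize → Spec_build_length_table quantize (build_length_table quantize)

-- ===== LEMMAS AND PROOFS =====

-- the undotted / dotted candidate sublists with grid value k (helpers for the proof only)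
def pvFU (k : Int) (e : Int × String) : Bool := !PySem.Str.endswith e.2 "." && e.1 == k
def pvFD (k : Int) (e : Int × String) : Bool := PySem.Str.endswith e.2 "." && e.1 == k

def pvCU (us : List (Int × String)) (q k : Int) : List (Int × String) :=
  us.filterMap (fun e =>
    let g := PySem.Int.floordiv q e.1
    if g ≥ 1 && g == k then some (g, e.2) else none)

def pvCD (ds : List (Int × String)) (q k : Int) : List (Int × String) :=
  ds.filterMap (fun e =>
    let g := PySem.Int.floordiv (q * 3) (e.1 * 4)
    if g ≥ 1 && g == k then some (g, e.2) else none)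

-- A's merge loop: last undotted wins, else the initial dict, else first dotted
lemma pvGetA (c : List (Int × String)) (d : PySem.Dict Int (Int × String)) (k : Int) :
    (c.foldl pvStepA d).get? k =
      ((c.filter (pvFU k)).reverse.head?).or
        ((d.get? k).or ((c.filter (pvFD k)).head?)) := by
  induction c generalizing d with
  | nil => simp
  | cons e c ih =>
    rw [List.foldl_cons, ih]
    by_cases hdot : PySem.Chars.endswith e.2.toList ['.'] = true
    · by_cases hk : e.1 = k
      · by_cases hc : d.contains e.1 = true
        · have hstep : pvStepA d e = d := by simp [pvStepA, hdot, hc]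
          have hsome : (d.get? k).isSome := by
            rw [← PySem.Dict.contains_eq_isSome_get?, ← hk]; exact hc
          obtain ⟨v, hv⟩ := Option.isSome_iff_exists.mp hsome
          rw [hstep]
          simp [pvFU, pvFD, hdot, hk, hv]
        · have hstep : pvStepA d e = d.insert e.1 e := by simp [pvStepA, hc]
          have hv : d.get? k = none := by
            rw [← hk]
            exact (PySem.Dict.get?_eq_none_iff_contains d e.1).mpr
              (Bool.not_eq_true _ ▸ hc)
          rw [hstep, hk, PySem.Dict.get?_insert]
          simp [pvFU, pvFD, hdot, hk, hv]
      · have hg : (pvStepA d e).get? k = d.get? k := by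
          unfold pvStepA
          dsimp only
          split_ifs <;>
            first
            | rfl
            | exact PySem.Dict.get?_insert_of_ne d e (fun h => hk h.symm)
        rw [hg]
        simp [pvFU, pvFD, hdot, hk]
    · have hstep : pvStepA d e = d.insert e.1 e := by
        unfold pvStepA; dsimp only; split_ifs with h1 h2
        · exact absurd h2 (by simpa using hdot)
        · rfl
        · rfl
      by_cases hk : e.1 = k
      · rw [hstep, hk, PySem.Dict.get?_insert]
        simp [pvFU, pvFD, hdot, hk]
      · have hk' : ¬ k = e.1 := fun h => hk h.symm
        rw [hstep, PySem.Dict.get?_insert]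
        simp [pvFU, pvFD, hdot, hk, hk']

-- B's first pass: last inserted (= last undotted with that grid) wins
lemma pvGetU (us : List (Int × String)) (q : Int) (d : PySem.Dict Int (Int × String)) (k : Int) :
    (us.foldl (pvStepU q) d).get? k = ((pvCU us q k).reverse.head?).or (d.get? k) := by
  induction us generalizing d with
  | nil => simp [pvCU]
  | cons e us ih =>
    rw [List.foldl_cons, ih]
    by_cases h1 : (1 : Int) ≤ PySem.Int.floordiv q e.1
    · by_cases h2 : PySem.Int.floordiv q e.1 = k
      · have h1' : (1 : Int) ≤ k := h2 ▸ h1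
        have hstep : pvStepU q d e = d.insert k (k, e.2) := by
          simp [pvStepU, h2, h1']
        have hcons : pvCU (e :: us) q k = (k, e.2) :: pvCU us q k := by
          simp [pvCU, h2, h1']
        rw [hstep, PySem.Dict.get?_insert, hcons, List.reverse_cons,
          List.head?_append]
        simp
      · have hstep : pvStepU q d e =
            d.insert (PySem.Int.floordiv q e.1) (PySem.Int.floordiv q e.1, e.2) := by
          simp [pvStepU, h1]
        have hcons : pvCU (e :: us) q k = pvCU us q k := by
          simp [pvCU, h2]
        rw [hstep, PySem.Dict.get?_insert, hcons,
          if_neg (fun h => h2 (Eq.symm h))]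
    · have hstep : pvStepU q d e = d := by simp [pvStepU, h1]
      have hcons : pvCU (e :: us) q k = pvCU us q k := by
        simp [pvCU, h1]
      rw [hstep, hcons]

-- B's second pass: existing entry wins, else first dotted with that grid
lemma pvGetD (ds : List (Int × String)) (q : Int) (d : PySem.Dict Int (Int × String)) (k : Int) :
    (ds.foldl (pvStepD q) d).get? k = (d.get? k).or ((pvCD ds q k).head?) := by
  induction ds generalizing d with
  | nil => simp [pvCD]
  | cons e ds ih =>
    rw [List.foldl_cons, ih]
    by_cases h1 : (1 : Int) ≤ PySem.Int.floordiv (q * 3) (e.1 * 4)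
    · by_cases h2 : PySem.Int.floordiv (q * 3) (e.1 * 4) = k
      · have h1' : (1 : Int) ≤ k := h2 ▸ h1
        have hcons : pvCD (e :: ds) q k = (k, e.2) :: pvCD ds q k := by
          simp [pvCD, h2, h1']
        by_cases hc : d.contains (PySem.Int.floordiv (q * 3) (e.1 * 4)) = true
        · have hstep : pvStepD q d e = d := by simp [pvStepD, hc]
          have hsome : (d.get? k).isSome := by
            rw [← PySem.Dict.contains_eq_isSome_get?, ← h2]; exact hc
          obtain ⟨v, hv⟩ := Option.isSome_iff_exists.mp hsome
          rw [hstep, hcons]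
          simp [hv]
        · have hc' : ¬ d.contains k = true := h2 ▸ hc
          have hstep : pvStepD q d e = d.insert k (k, e.2) := by
            simp [pvStepD, h2, h1', hc']
          have hv : d.get? k = none := by
            rw [← h2]
            exact (PySem.Dict.get?_eq_none_iff_contains d _).mpr
              (Bool.not_eq_true _ ▸ hc)
          rw [hstep, hcons, PySem.Dict.get?_insert]
          simp [hv]
      · have hcons : pvCD (e :: ds) q k = pvCD ds q k := by
          simp [pvCD, h2]
        by_cases hc : d.contains (PySem.Int.floordiv (q * 3) (e.1 * 4)) = true
        · have hstep : pvStepD q d e = d := by simp [pvStepD, hc]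
          rw [hstep, hcons]
        · have hstep : pvStepD q d e =
              d.insert (PySem.Int.floordiv (q * 3) (e.1 * 4))
                (PySem.Int.floordiv (q * 3) (e.1 * 4), e.2) := by
            simp [pvStepD, h1, hc]
          rw [hstep, hcons, PySem.Dict.get?_insert,
            if_neg (fun h => h2 (Eq.symm h))]
    · have hstep : pvStepD q d e = d := by simp [pvStepD, h1]
      have hcons : pvCD (e :: ds) q k = pvCD ds q k := by
        simp [pvCD, h1]
      rw [hstep, hcons]

-- candidates list produced by A's first loop, as filter+map (via PySem.List.foldl_append_ite)
def pvKeep (q : Int) (e : Int × String × Bool) : Bool :=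
  decide ((if e.2.2 then PySem.Int.floordiv (q * 3) (e.1 * 4) else PySem.Int.floordiv q e.1) ≥ 1)

def pvToEnt (q : Int) (e : Int × String × Bool) : Int × String :=
  ((if e.2.2 then PySem.Int.floordiv (q * 3) (e.1 * 4) else PySem.Int.floordiv q e.1), e.2.1)

-- bridge: the undotted sublist of A's candidates with grid k is B's pvCU
lemma pvBridgeU (s : List (Int × String × Bool)) (q k : Int)
    (h : ∀ e ∈ s, PySem.Str.endswith e.2.1 "." = e.2.2) :
    ((s.filter (pvKeep q)).map (pvToEnt q)).filter (pvFU k) =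
      pvCU ((s.filter (fun e => !e.2.2)).map (fun e => (e.1, e.2.1))) q k := by
  induction s with
  | nil => simp [pvCU]
  | cons e s ih =>
    have hdot := h e List.mem_cons_self
    have ih' := ih (fun x hx => h x (List.mem_cons_of_mem _ hx))
    rcases e with ⟨dv, tok, dot⟩
    cases dot with
    | true =>
      by_cases hkeep : pvKeep q (dv, tok, true) = true
      · simp only [List.filter_cons, hkeep, if_true, List.map_cons,
          List.filter_cons, pvFU]
        simp at hdot
        simp [pvToEnt, hdot, ih']
      · simp [hkeep, ih']
    | false =>
      simp at hdot
      by_cases h1 : (1 : Int) ≤ PySem.Int.floordiv q dv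
      · have hkeep : pvKeep q (dv, tok, false) = true := by simp [pvKeep, h1]
        by_cases h2 : PySem.Int.floordiv q dv = k
        · simp [hkeep, pvFU, pvToEnt, hdot, h2, h2 ▸ h1, pvCU,
            ih']
        · simp [hkeep, pvFU, pvToEnt, hdot, h2, pvCU,
            ih']
      · have hkeep : ¬ pvKeep q (dv, tok, false) = true := by simp [pvKeep, h1]
        simp [hkeep, pvCU, h1, ih']

lemma pvBridgeD (s : List (Int × String × Bool)) (q k : Int)
    (h : ∀ e ∈ s, PySem.Str.endswith e.2.1 "." = e.2.2) :
    ((s.filter (pvKeep q)).map (pvToEnt q)).filter (pvFD k) =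
      pvCD ((s.filter (fun e => e.2.2)).map (fun e => (e.1, e.2.1))) q k := by
  induction s with
  | nil => simp [pvCD]
  | cons e s ih =>
    have hdot := h e List.mem_cons_self
    have ih' := ih (fun x hx => h x (List.mem_cons_of_mem _ hx))
    rcases e with ⟨dv, tok, dot⟩
    cases dot with
    | false =>
      by_cases hkeep : pvKeep q (dv, tok, false) = true
      · simp only [List.filter_cons, hkeep, if_true, List.map_cons,
          List.filter_cons, pvFD]
        simp at hdot
        simp [pvToEnt, hdot, ih']
      · simp [hkeep, ih']
    | true =>
      simp at hdot
      by_cases h1 : (1 : Int) ≤ PySem.Int.floordiv (q * 3) (dv * 4)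
      · have hkeep : pvKeep q (dv, tok, true) = true := by simp [pvKeep, h1]
        by_cases h2 : PySem.Int.floordiv (q * 3) (dv * 4) = k
        · simp [hkeep, pvFD, pvToEnt, hdot, h2, h2 ▸ h1, pvCD,
            ih']
        · simp [hkeep, pvFD, pvToEnt, hdot, h2, pvCD,
            ih']
      · have hkeep : ¬ pvKeep q (dv, tok, true) = true := by simp [pvKeep, h1]
        simp [hkeep, pvCD, h1, ih']

lemma pvSpecsDot : ∀ e ∈ pvSpecsA, PySem.Str.endswith e.2.1 "." = e.2.2 := by decide

lemma pvSpecsU : (pvSpecsA.filter (fun e => !e.2.2)).map (fun e => (e.1, e.2.1)) = pvUndotted := by decide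

lemma pvSpecsD : (pvSpecsA.filter (fun e => e.2.2)).map (fun e => (e.1, e.2.1)) = pvDotted := by decide

-- both dicts agree on every lookup
lemma pvDictA_get (q k : Int) :
    (((pvSpecsA.filter (pvKeep q)).map (pvToEnt q)).foldl pvStepA
        PySem.Dict.empty).get? k =
      ((pvCU pvUndotted q k).reverse.head?).or ((pvCD pvDotted q k).head?) := by
  rw [pvGetA, pvBridgeU pvSpecsA q k pvSpecsDot, pvBridgeD pvSpecsA q k pvSpecsDot,
    pvSpecsU, pvSpecsD]
  simp

lemma pvDictB_get (q k : Int) :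
    (pvDotted.foldl (pvStepD q) (pvUndotted.foldl (pvStepU q) PySem.Dict.empty)).get? k =
      ((pvCU pvUndotted q k).reverse.head?).or ((pvCD pvDotted q k).head?) := by
  rw [pvGetD, pvGetU]
  simp

-- every value stored under key k has first component k
lemma pvMemCU (us : List (Int × String)) (q k : Int) (v : Int × String)
    (hv : v ∈ pvCU us q k) : v.1 = k := by
  simp only [pvCU] at hv
  rcases List.mem_filterMap.mp hv with ⟨e, -, he⟩
  split at he
  · cases he
    next hcond =>
      simp only [Bool.and_eq_true, decide_eq_true_eq, beq_iff_eq] at hcond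
      exact hcond.2
  · cases he

lemma pvMemCD (ds : List (Int × String)) (q k : Int) (v : Int × String)
    (hv : v ∈ pvCD ds q k) : v.1 = k := by
  simp only [pvCD] at hv
  rcases List.mem_filterMap.mp hv with ⟨e, -, he⟩
  split at he
  · cases he
    next hcond =>
      simp only [Bool.and_eq_true, decide_eq_true_eq, beq_iff_eq] at hcond
      exact hcond.2
  · cases he

-- keys stay Nodup through any fold whose step is 'keep or insert'
lemma pvNodupFold {a : Type} (step : PySem.Dict Int (Int × String) -> a -> PySem.Dict Int (Int × String))
    (hstep : ∀ d e, (PySem.Dict.keys d).Nodup -> (PySem.Dict.keys (step d e)).Nodup)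
    (l : List a) (d : PySem.Dict Int (Int × String)) (hd : (PySem.Dict.keys d).Nodup) :
    (PySem.Dict.keys (l.foldl step d)).Nodup := by
  induction l generalizing d with
  | nil => exact hd
  | cons e l ih => exact ih _ (hstep d e hd)

lemma pvStepA_nodup (d : PySem.Dict Int (Int × String)) (e : Int × String)
    (hd : (PySem.Dict.keys d).Nodup) : (PySem.Dict.keys (pvStepA d e)).Nodup := by
  unfold pvStepA; dsimp only; split_ifs <;>
    first | exact hd | exact PySem.Dict.nodup_keys_insert _ _ _ hd

lemma pvStepU_nodup (q : Int) (d : PySem.Dict Int (Int × String)) (e : Int × String)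
    (hd : (PySem.Dict.keys d).Nodup) : (PySem.Dict.keys (pvStepU q d e)).Nodup := by
  unfold pvStepU; dsimp only; split_ifs <;>
    first | exact hd | exact PySem.Dict.nodup_keys_insert _ _ _ hd

lemma pvStepD_nodup (q : Int) (d : PySem.Dict Int (Int × String)) (e : Int × String)
    (hd : (PySem.Dict.keys d).Nodup) : (PySem.Dict.keys (pvStepD q d e)).Nodup := by
  unfold pvStepD; dsimp only; split_ifs <;>
    first | exact hd | exact PySem.Dict.nodup_keys_insert _ _ _ hd

-- the main equivalence, pointwise lookups to sorted output
lemma pvMain (q : Int) : build_length_table q = build_length_table_alt q := by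
  simp only [build_length_table, build_length_table_alt]
  rw [PySem.List.foldl_append_ite
    (p := fun e : Int × String × Bool =>
      (if e.2.2 then PySem.Int.floordiv (q * 3) (e.1 * 4)
       else PySem.Int.floordiv q e.1) ≥ 1)
    (f := fun e : Int × String × Bool =>
      ((if e.2.2 then PySem.Int.floordiv (q * 3) (e.1 * 4)
        else PySem.Int.floordiv q e.1), e.2.1))]
  rw [List.nil_append]
  have hfilter : (pvSpecsA.filter fun e =>
      decide ((if e.2.2 then PySem.Int.floordiv (q * 3) (e.1 * 4)
               else PySem.Int.floordiv q e.1) ≥ 1)) = pvSpecsA.filter (pvKeep q) := rfl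
  rw [hfilter]
  set dA := ((pvSpecsA.filter (pvKeep q)).map (pvToEnt q)).foldl pvStepA
    PySem.Dict.empty with hdA
  set dB := pvDotted.foldl (pvStepD q) (pvUndotted.foldl (pvStepU q) PySem.Dict.empty)
    with hdB
  have hget : ∀ kk, dA.get? kk = dB.get? kk := fun kk => by
    rw [hdA, hdB]
    exact (pvDictA_get q kk).trans (pvDictB_get q kk).symm
  have hndA : dA.keys.Nodup := by
    rw [hdA]
    exact pvNodupFold pvStepA pvStepA_nodup _ _ (by simp)
  have hndB : dB.keys.Nodup := by
    rw [hdB]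
    exact pvNodupFold _ (pvStepD_nodup q) _ _
      (pvNodupFold _ (pvStepU_nodup q) _ _ (by simp))
  have hmem : ∀ x, x ∈ dA.keys ↔ x ∈ dB.keys := by
    intro x
    rw [← PySem.Dict.contains_iff_mem_keys, ← PySem.Dict.contains_iff_mem_keys,
      PySem.Dict.contains_eq_isSome_get?, PySem.Dict.contains_eq_isSome_get?, hget x]
  have hperm : dA.keys.Perm dB.keys := (List.perm_ext_iff_of_nodup hndA hndB).mpr hmem
  have hvA := PySem.Dict.values_eq_map_keys dA hndA ((0 : Int), "")
  have hvB := PySem.Dict.values_eq_map_keys dB hndB ((0 : Int), "")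
  have hfg : (fun kk => dA.getD kk ((0 : Int), "")) =
      (fun kk => dB.getD kk ((0 : Int), "")) := by
    funext kk
    rw [PySem.Dict.getD_eq_get?_getD, PySem.Dict.getD_eq_get?_getD, hget kk]
  have hpermv : dA.values.Perm dB.values := by
    rw [hvA, hvB, hfg]
    exact hperm.map _
  have hkey : ∀ kk v, dA.get? kk = some v → v.1 = kk := by
    intro kk v hv
    rw [hdA, pvDictA_get q kk] at hv
    rcases Option.or_eq_some_iff.mp hv with h | ⟨-, h⟩
    · exact pvMemCU pvUndotted q kk v
        (List.mem_reverse.mp (List.mem_of_head? h))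
    · exact pvMemCD pvDotted q kk v (List.mem_of_head? h)
  have h1comp : dA.values.map (fun v => v.1) = dA.keys := by
    rw [hvA, List.map_map]
    have : ∀ kk ∈ dA.keys, ((fun v : Int × String => v.1) ∘
        (fun kk => dA.getD kk ((0 : Int), ""))) kk = kk := by
      intro kk hkk
      have hc : dA.contains kk = true := (PySem.Dict.contains_iff_mem_keys _ _).mpr hkk
      have hsome : (dA.get? kk).isSome := by
        rw [← PySem.Dict.contains_eq_isSome_get?]; exact hc
      obtain ⟨v, hv⟩ := Option.isSome_iff_exists.mp hsome
      simp only [Function.comp]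
      rw [PySem.Dict.getD_of_get?_eq_some dA ((0 : Int), "") hv]
      exact hkey kk v hv
    rw [List.map_congr_left this]
    simp
  have hPermYs : (PySem.List.sorted dA.values (fun x => -x.1) false).Perm dA.values :=
    PySem.List.sorted_perm _ _ false
  have hnodupmap : ((PySem.List.sorted dA.values (fun x => -x.1) false).map
      (fun v => v.1)).Nodup := by
    rw [(hPermYs.map (fun v : Int × String => v.1)).nodup_iff, h1comp]
    exact hndA
  have hne : (PySem.List.sorted dA.values (fun x => -x.1) false).Pairwise
      (fun a b => a.1 ≠ b.1) := List.pairwise_map.mp hnodupmap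
  have hle : (PySem.List.sorted dA.values (fun x => -x.1) false).Pairwise
      (fun a b => -a.1 ≤ -b.1) := PySem.List.sorted_pairwise _ _
  have hlt : (PySem.List.sorted dA.values (fun x => -x.1) false).Pairwise
      (fun a b : Int × String => -a.1 < -b.1) := by
    refine (hle.and hne).imp ?_
    intro a b hab
    omega
  exact (PySem.List.sorted_eq_of_perm_of_pairwise_lt dB.values _ (fun x => -x.1)
    (hPermYs.trans hpermv) hlt).symm


-- ===== VERDICT (by name: the statement is the Claim_ definition above) =====
theorem build_length_table_spec : Claim_equal_build_length_table := by
  intro q _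
  unfold Spec_build_length_table
  exact pvMain q
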